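-- pv_equiv track=rewrite | github.com/paiml/depyler | examples/hard_tower_of_hanoi.py | hanoi_largest_moved
-- ===== SOURCE A (Python) =====
-- def hanoi_largest_moved(move: int) -> int:
--     """Find which disk is moved on a given move (1-indexed)."""
--     if move <= 0:
--         return 0
--     disk: int = 1
--     m: int = move
--     while m % 2 == 0:
--         disk = disk + 1
--         m = m // 2
--     return disk
-- ===== SOURCE B (Python) =====
-- def hanoi_largest_moved(move: int) -> int:
--     """Find which disk is moved on a given move (1-indexed)."""
--     if move <= 0:
--         return 0
--     return (move & -move).bit_length()
-- ===== Notes on version B (the rewrite author's own statement) =====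
-- stated objective: idiomatic
-- what changed: Replaces the while-loop that repeatedly halves the move number to count trailing zeros with the branch-free closed form (move & -move).bit_length(): the lowest set bit is isolated and bit_length reads off its position directly.
import Mathlib
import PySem

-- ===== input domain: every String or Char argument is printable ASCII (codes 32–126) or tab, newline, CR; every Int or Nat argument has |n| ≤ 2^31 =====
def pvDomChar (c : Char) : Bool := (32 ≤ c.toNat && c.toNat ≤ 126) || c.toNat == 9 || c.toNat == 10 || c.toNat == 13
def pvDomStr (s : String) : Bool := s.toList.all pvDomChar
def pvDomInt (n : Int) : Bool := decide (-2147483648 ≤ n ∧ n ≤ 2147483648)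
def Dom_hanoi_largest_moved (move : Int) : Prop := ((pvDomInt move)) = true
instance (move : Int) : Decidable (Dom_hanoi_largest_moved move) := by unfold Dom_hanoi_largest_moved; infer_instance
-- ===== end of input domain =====

-- B replaces A's halving loop with the closed form (move & -move).bit_length(); objective: idiomatic.

-- ===== PORT A =====
-- A's while loop: disk/m are the loop state; `0 < m` is only a totality guard
-- (the loop is entered with m = move > 0, on which it is vacuous).
def hanoiLoop (disk m : Int) : Int :=
  if h : PySem.Int.mod m 2 = 0 ∧ 0 < m then
    hanoiLoop (disk + 1) (PySem.Int.floordiv m 2)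
  else disk
termination_by m.toNat
decreasing_by
  rw [PySem.Int.floordiv_eq_ediv_of_pos (by omega : (0:Int) < 2)]
  omega

def hanoi_largest_moved (move : Int) : Int :=
  if move ≤ 0 then 0
  else hanoiLoop 1 move

-- ===== PORT B =====
def hanoi_largest_moved_alt (move : Int) : Int :=
  if move ≤ 0 then 0
  else (PySem.Int.bitLength (PySem.Int.band move (-move)) : Int)

-- ===== PRECONDITION & SPEC =====
def Spec_hanoi_largest_moved (move : Int) (out : Int) : Prop := out = hanoi_largest_moved_alt move
instance (move : Int) (out : Int) : Decidable (Spec_hanoi_largest_moved move out) := by unfold Spec_hanoi_largest_moved; infer_instance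

-- ===== CLAIM (what is proved, stated in full; the proofs are below) =====
def Claim_equal_hanoi_largest_moved : Prop := ∀ (move : Int), Dom_hanoi_largest_moved move → Spec_hanoi_largest_moved move (hanoi_largest_moved move)

-- ===== LEMMAS AND PROOFS =====

-- bit 0 of an odd number survives only against another odd number
theorem and_pred_odd (m : ℕ) : (2 * m + 1) &&& (2 * m) = 2 * m := by
  apply Nat.eq_of_testBit_eq
  intro k
  cases k with
  | zero =>
    simp [Nat.testBit_zero]
  | succ k =>
    have h1 : (2 * m + 1) / 2 = m := by omega
    have h2 : (2 * m) / 2 = m := by omega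
    simp [Nat.testBit_succ, Nat.and_div_two, h1, h2]

theorem and_pred_even (m : ℕ) (hm : 0 < m) :
    (2 * m) &&& (2 * m - 1) = 2 * (m &&& (m - 1)) := by
  apply Nat.eq_of_testBit_eq
  intro k
  cases k with
  | zero =>
    simp [Nat.testBit_zero]
  | succ k =>
    have h1 : (2 * m) / 2 = m := by omega
    have h2 : (2 * m - 1) / 2 = m - 1 := by omega
    have h3 : (2 * (m &&& (m - 1))) / 2 = m &&& (m - 1) := by omega
    simp [Nat.testBit_succ, Nat.and_div_two, Nat.testBit_and, h1, h2, h3]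

-- the trailing-zero count computed by A's loop equals bit_length of the isolated low bit
theorem hanoiLoop_eq (n : ℕ) (hn : 0 < n) (d : Int) :
    hanoiLoop d (n : Int) = d + (PySem.Int.bitLength ((n - (n &&& (n - 1)) : ℕ) : Int) : Int) - 1 := by
  induction n using Nat.strong_induction_on generalizing d with
  | _ n ih =>
    rcases Nat.even_or_odd n with ⟨m, hm⟩ | ⟨m, hm⟩
    · -- n = 2 * m (even), m > 0
      subst hm
      simp only [show m + m = 2 * m from by ring] at *
      have hm0 : 0 < m := by omega
      have hmod : PySem.Int.mod ((2 * m : ℕ) : Int) 2 = 0 := by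
        rw [PySem.Int.mod_eq_emod_of_pos (by omega : (0:Int) < 2)]
        push_cast
        omega
      have hdiv : PySem.Int.floordiv ((2 * m : ℕ) : Int) 2 = (m : Int) := by
        rw [PySem.Int.floordiv_eq_ediv_of_pos (by omega : (0:Int) < 2)]
        push_cast
        omega
      rw [hanoiLoop, dif_pos ⟨hmod, by push_cast; omega⟩, hdiv,
        ih m (by omega) hm0 (d + 1)]
      have hand := and_pred_even m hm0
      have hle : m &&& (m - 1) ≤ m := Nat.and_le_left
      have hL : (2 * m) - ((2 * m) &&& (2 * m - 1)) = 2 * (m - (m &&& (m - 1))) := by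
        rw [hand]; omega
      have hLpos : 0 < m - (m &&& (m - 1)) := by
        have : m &&& (m - 1) ≤ m - 1 := Nat.and_le_right
        omega
      have hbl : PySem.Int.bitLength (((2 * m) - ((2 * m) &&& (2 * m - 1)) : ℕ) : Int)
          = PySem.Int.bitLength ((m - (m &&& (m - 1)) : ℕ) : Int) + 1 := by
        rw [hL, PySem.Int.bitLength_natCast (by omega),
          Nat.mul_div_cancel_left _ (by omega : 0 < 2)]
      rw [hbl]
      push_cast
      ring
    · -- n = 2 * m + 1 (odd): loop exits at once, low bit is 1
      subst hm
      have hmod : PySem.Int.mod ((2 * m + 1 : ℕ) : Int) 2 ≠ 0 := by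
        rw [PySem.Int.mod_eq_emod_of_pos (by omega : (0:Int) < 2)]
        push_cast
        omega
      rw [hanoiLoop, dif_neg (by intro h; exact hmod h.1)]
      have hL : (2 * m + 1) - ((2 * m + 1) &&& (2 * m + 1 - 1)) = 1 := by
        have : (2 * m + 1 - 1) = 2 * m := by omega
        rw [this, and_pred_odd]
        omega
      rw [hL, show PySem.Int.bitLength ((1:ℕ):Int) = 1 from by decide]
      push_cast
      ring

theorem band_pos_neg (n : ℕ) (hn : 0 < n) :
    PySem.Int.band (n : Int) (-(n : Int)) = ((n - (n &&& (n - 1)) : ℕ) : Int) := by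
  have h1 : ¬ (0 ≤ -(n : Int)) := by omega
  have h2 : (0:Int) ≤ (n : Int) := by omega
  simp only [PySem.Int.band, if_pos h2, if_neg h1]
  have h3 : (-(-(n : Int)) - 1).toNat = n - 1 := by omega
  have h4 : ((n : Int)).toNat = n := by omega
  rw [h3, h4]

-- ===== VERDICT (by name: the statement is the Claim_ definition above) =====
theorem hanoi_largest_moved_spec : Claim_equal_hanoi_largest_moved := by
  intro move _
  unfold Spec_hanoi_largest_moved hanoi_largest_moved hanoi_largest_moved_alt
  by_cases h : move ≤ 0
  · simp [h]
  · rw [if_neg h, if_neg h]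
    have hpos : 0 < move := by omega
    obtain ⟨n, hn, rfl⟩ : ∃ n : ℕ, 0 < n ∧ move = (n : Int) :=
      ⟨move.toNat, by omega, by omega⟩
    rw [band_pos_neg n hn, hanoiLoop_eq n hn 1]
    ring
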